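-- pv_equiv track=rewrite | github.com/TattdCodeMonkey/advent-of-code | 2018/day-02/solution-1.py | idReducer
-- ===== SOURCE A (Python) =====
-- def countLetters(value):
--     result = {}
--     for letter in value:
--         if letter in result:
--             result[letter] += 1
--         else:
--             result[letter] = 1
--     return result
--
-- def idReducer(res, val):
--     twoLetter = False
--     threeLetters = False
--     for _,v in countLetters(val).items():
--         if v == 2:
--             twoLetter = True
--         if v == 3:
--             threeLetters = True
--     if twoLetter:
--         res['2'] += 1
--     if threeLetters:
--         res['3'] += 1
--     return res
-- ===== SOURCE B (Python) =====
-- def idReducer(res, val):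
--     s = sorted(val)
--     twoLetter = False
--     threeLetters = False
--     i = 0
--     n = len(s)
--     while i < n:
--         j = i + 1
--         while j < n and s[j] == s[i]:
--             j += 1
--         run = j - i
--         if run == 2:
--             twoLetter = True
--         if run == 3:
--             threeLetters = True
--         i = j
--     if twoLetter:
--         res['2'] += 1
--     if threeLetters:
--         res['3'] += 1
--     return res
-- ===== Notes on version B (the rewrite author's own statement) =====
-- stated objective: alternative
-- what changed: Replaces the hash-table letter-frequency dict (build a counter, then iterate its items) with sort-then-scan: the string is sorted and consecutive equal characters are scanned as runs, setting the flags from run lengths; the res['2']/res['3'] increment tail is kept.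
import Mathlib
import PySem

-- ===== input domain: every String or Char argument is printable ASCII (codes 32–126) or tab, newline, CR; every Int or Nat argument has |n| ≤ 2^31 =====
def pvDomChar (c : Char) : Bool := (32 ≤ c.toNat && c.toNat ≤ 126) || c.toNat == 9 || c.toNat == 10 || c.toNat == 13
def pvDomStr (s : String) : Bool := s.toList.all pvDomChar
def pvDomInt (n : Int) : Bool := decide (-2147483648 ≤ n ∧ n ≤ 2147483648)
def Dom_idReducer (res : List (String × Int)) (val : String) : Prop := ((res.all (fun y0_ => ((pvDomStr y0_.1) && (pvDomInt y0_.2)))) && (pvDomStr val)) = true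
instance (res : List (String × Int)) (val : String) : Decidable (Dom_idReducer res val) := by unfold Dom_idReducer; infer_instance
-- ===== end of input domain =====

-- B replaces A's frequency-dict counting with sort-then-scan over runs of equal characters;
-- same cost class, no speed claim. Python A/B mutate `res` in place; the equivalence proved
-- here is about the returned association list.

-- ===== PORT A =====
def countLetters (value : String) : PySem.Dict Char Int :=
  value.toList.foldl
    (fun result letter =>
      if result.contains letter then result.insert letter (result.getD letter 0 + 1)
      else result.insert letter 1)
    PySem.Dict.empty

def idReducer (res : List (String × Int)) (val : String) : List (String × Int) :=
  let flags := (countLetters val).items.foldl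
    (fun (p : Bool × Bool) kv =>
      ((if kv.2 == 2 then true else p.1), (if kv.2 == 3 then true else p.2)))
    (false, false)
  let d := PySem.Dict.mk res
  let d := if flags.1 then d.modify "2" 0 (· + 1) else d
  let d := if flags.2 then d.modify "3" 0 (· + 1) else d
  d.items

-- ===== PORT B =====
-- the outer while loop of Source B: consume one run of equal characters per step
def scanRuns : List Char → Bool → Bool → Bool × Bool
  | [], two, three => (two, three)
  | c :: rest, two, three =>
      let run : Int := 1 + (rest.takeWhile (· == c)).length
      scanRuns (rest.dropWhile (· == c))
        (if run == 2 then true else two)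
        (if run == 3 then true else three)
  termination_by l => l.length
  decreasing_by
    simp only [List.length_cons]
    exact Nat.lt_succ_of_le (List.length_dropWhile_le _ _)

def idReducer_alt (res : List (String × Int)) (val : String) : List (String × Int) :=
  let s := PySem.List.sorted val.toList (fun c => c) false
  let flags := scanRuns s false false
  let d := PySem.Dict.mk res
  let d := if flags.1 then d.modify "2" 0 (· + 1) else d
  let d := if flags.2 then d.modify "3" 0 (· + 1) else d
  d.items

-- ===== PRECONDITION & SPEC =====
-- Pre_ excludes exactly the inputs where Python A raises KeyError: some letter occurs exactly
-- twice (resp. three times) in val but res has no key '2' (resp. '3').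
def Pre_idReducer (res : List (String × Int)) (val : String) : Prop :=
  (val.toList.any (fun c => val.toList.count c == 2) = true → "2" ∈ res.map Prod.fst) ∧
  (val.toList.any (fun c => val.toList.count c == 3) = true → "3" ∈ res.map Prod.fst)
instance (res : List (String × Int)) (val : String) : Decidable (Pre_idReducer res val) := by unfold Pre_idReducer; infer_instance
def pvWitness_idReducer : (List (String × Int)) × String := ([("2", 0), ("3", 4)], "ab")

def Spec_idReducer (res : List (String × Int)) (val : String) (out : List (String × Int)) : Prop := out = idReducer_alt res val
instance (res : List (String × Int)) (val : String) (out : List (String × Int)) : Decidable (Spec_idReducer res val out) := by unfold Spec_idReducer; infer_instance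

-- ===== CLAIM (what is proved, stated in full; the proofs are below) =====
def Claim_equal_idReducer : Prop := ∀ (res : List (String × Int)) (val : String), Dom_idReducer res val → Pre_idReducer res val → Spec_idReducer res val (idReducer res val)

-- ===== LEMMAS AND PROOFS =====

theorem dropWhile_head_false {p : Char → Bool} {l l' : List Char} {e : Char}
    (h : l.dropWhile p = e :: l') : p e = false := by
  induction l with
  | nil => simp at h
  | cons a t ih =>
      rw [List.dropWhile_cons] at h
      split at h
      · exact ih h
      · next hp => cases h; simpa using hp

-- A's hand-written counting loop builds exactly Counter(val)
theorem countLetters_eq_counter (value : String) :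
    countLetters value = PySem.Dict.counter value.toList := by
  rw [← PySem.Dict.foldl_insert_getD_add_one_eq_counter]
  unfold countLetters
  congr 1
  funext d c
  by_cases h : d.contains c = true
  · simp [h]
  · simp only [Bool.not_eq_true] at h
    simp [h, PySem.Dict.getD_of_not_contains d 0 h]

-- the flag fold over an items list
theorem foldl_flags (l : List (Char × Int)) (two three : Bool) :
    l.foldl (fun (p : Bool × Bool) kv =>
        ((if kv.2 == 2 then true else p.1), (if kv.2 == 3 then true else p.2))) (two, three)
      = (two || l.any (fun kv => kv.2 == 2), three || l.any (fun kv => kv.2 == 3)) := by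
  induction l generalizing two three with
  | nil => simp
  | cons kv t ih =>
      simp only [List.foldl_cons, List.any_cons, ih]
      cases h2 : (kv.2 == 2) <;> cases h3 : (kv.2 == 3) <;> cases two <;> cases three <;>
        simp

theorem scanRuns_spec (l : List Char) (h : l.Pairwise (· ≤ ·)) (two three : Bool) :
    scanRuns l two three =
      (two || decide (∃ c ∈ l, l.count c = 2), three || decide (∃ c ∈ l, l.count c = 3)) := by
  induction l, two, three using scanRuns.induct with
  | case1 two three => simp [scanRuns]
  | case2 c rest two three run ih =>
      have hrest : (rest.dropWhile (· == c)).Pairwise (· ≤ ·) :=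
        List.Pairwise.sublist (List.dropWhile_sublist _) (List.pairwise_cons.mp h).2
      rw [scanRuns]
      have ih' := ih hrest
      simp only [dite_eq_ite] at ih'
      rw [ih']
      have hsplit : rest = rest.takeWhile (· == c) ++ rest.dropWhile (· == c) :=
        (List.takeWhile_append_dropWhile).symm
      set t := rest.takeWhile (· == c) with ht
      set d := rest.dropWhile (· == c) with hd
      have htc : ∀ x ∈ t, x = c := by
        intro x hx
        have := List.mem_takeWhile_imp hx
        simpa using this
      -- every element of d is ≠ c
      have hdc : ∀ x ∈ d, x ≠ c := by
        intro x hx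
        cases hdd : d with
        | nil => simp [hdd] at hx
        | cons e d' =>
            have he' := dropWhile_head_false (hd.symm.trans hdd)
            have he : ¬ (e == c) = true := by simp only [he']; exact Bool.false_ne_true
            have hec : e ≠ c := by simpa using he
            have hce : c ≤ e := by
              have hmem : e ∈ rest := by
                rw [hsplit, hdd]; exact List.mem_append_right _ (by simp)
              exact (List.pairwise_cons.mp h).1 e hmem
            have hlt : c < e := lt_of_le_of_ne hce (Ne.symm hec)
            rw [hdd] at hx
            rcases List.mem_cons.mp hx with rfl | hx'
            · exact hec
            · have hrestPW : (e :: d').Pairwise (· ≤ ·) := by rw [← hdd]; exact hrest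
              have : e ≤ x := (List.pairwise_cons.mp hrestPW).1 x hx'
              exact fun hxc => absurd (hxc ▸ this) (not_le_of_gt hlt)
      -- counts
      have hcount_c : (c :: rest).count c = 1 + t.length := by
        rw [List.count_cons_self]
        conv_lhs => rw [hsplit]
        rw [List.count_append]
        have h1 : t.count c = t.length := List.count_eq_length.mpr (fun x hx => by
          have := htc x hx; simp [this])
        have h2 : d.count c = 0 := List.count_eq_zero.mpr (fun hc => hdc c hc rfl)
        omega
      have hcount_ne : ∀ x, x ≠ c → (c :: rest).count x = d.count x := by
        intro x hx
        conv_lhs => rw [hsplit]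
        have h1 : t.count x = 0 := List.count_eq_zero.mpr (fun hc => hx (htc x hc))
        simp [List.count_append, h1, Ne.symm hx]
      have hmem_iff : ∀ n : Nat, ((∃ x ∈ c :: rest, (c :: rest).count x = n) ↔
          ((c :: rest).count c = n ∨ ∃ x ∈ d, d.count x = n)) := by
        intro n
        constructor
        · rintro ⟨x, hx, hcnt⟩
          by_cases hxc : x = c
          · exact Or.inl (hxc ▸ hcnt)
          · right
            rcases List.mem_cons.mp hx with rfl | hx'
            · exact absurd rfl hxc
            · rw [hsplit] at hx'
              rcases List.mem_append.mp hx' with h1 | h2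
              · exact absurd (htc x h1) hxc
              · exact ⟨x, h2, by rw [← hcount_ne x hxc]; exact hcnt⟩
        · rintro (hc | ⟨x, hx, hcnt⟩)
          · exact ⟨c, List.mem_cons_self, hc⟩
          · refine ⟨x, ?_, ?_⟩
            · exact List.mem_cons_of_mem _ (by rw [hsplit]; exact List.mem_append_right _ hx)
            · rw [hcount_ne x (hdc x hx)]; exact hcnt
      have hrun : run = 1 + (t.length : Int) := rfl
      have beq_int : ∀ a b : Int, (a == b) = decide (a = b) := by
        intro a b
        cases hab : decide (a = b)
        · simp at hab; simpa using hab
        · simp at hab; simp [hab]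
      have hrn : ∀ n : Nat, (run == (n : Int)) = decide ((c :: rest).count c = n) := by
        intro n
        rw [hrun, hcount_c, beq_int, decide_eq_decide]
        omega
      have hflag : ∀ (n : Nat) (b : Bool),
          ((if run == (n : Int) then true else b) || decide (∃ x ∈ d, d.count x = n))
            = (b || decide (∃ x ∈ c :: rest, (c :: rest).count x = n)) := by
        intro n b
        rw [hrn]
        rcases Decidable.em ((c :: rest).count c = n) with hcc | hcc
        · have hR : ∃ x ∈ c :: rest, (c :: rest).count x = n := (hmem_iff n).mpr (Or.inl hcc)
          rw [decide_eq_true hcc, decide_eq_true hR, if_pos rfl]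
          simp
        · have hiff : (∃ x ∈ c :: rest, (c :: rest).count x = n) ↔ (∃ x ∈ d, d.count x = n) := by
            constructor
            · intro hx
              rcases (hmem_iff n).mp hx with h1 | h2
              · exact absurd h1 hcc
              · exact h2
            · intro hx; exact (hmem_iff n).mpr (Or.inr hx)
          rw [decide_eq_false hcc, if_neg (by simp), decide_eq_decide.mpr hiff]
      exact Prod.ext (hflag 2 two) (hflag 3 three)

-- both flag computations give "some letter occurs exactly n times"
theorem flags_eq (val : String) :
    (countLetters val).items.foldl
      (fun (p : Bool × Bool) kv =>
        ((if kv.2 == 2 then true else p.1), (if kv.2 == 3 then true else p.2)))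
      (false, false)
    = scanRuns (PySem.List.sorted val.toList (fun c => c) false) false false := by
  set xs := val.toList
  set s := PySem.List.sorted xs (fun c => c) false with hs
  have hperm : s.Perm xs := PySem.List.sorted_perm xs _ false
  have hsorted : s.Pairwise (· ≤ ·) := by
    have := PySem.List.sorted_pairwise xs (fun c => c) (κ := Char)
    simpa using this
  rw [scanRuns_spec s hsorted, countLetters_eq_counter, PySem.Dict.items_counter, foldl_flags]
  have hany : ∀ n : Nat, ((PySem.Set.ofList xs).map (fun k => (k, (xs.count k : Int)))).any
      (fun kv => kv.2 == (n : Int)) = decide (∃ c ∈ s, s.count c = n) := by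
    intro n
    rw [List.any_map]
    cases hres : decide (∃ c ∈ s, s.count c = n) with
    | true =>
        simp only [decide_eq_true_eq] at hres
        obtain ⟨c, hc, hcnt⟩ := hres
        apply List.any_eq_true.mpr
        refine ⟨c, (PySem.Set.mem_ofList _ _).mpr (hperm.mem_iff.mp hc), ?_⟩
        simp only [Function.comp]
        rw [hperm.count_eq] at hcnt
        simp [hcnt]
    | false =>
        simp only [decide_eq_false_iff_not] at hres
        apply List.any_eq_false.mpr
        rintro c hc
        have hcx : c ∈ xs := (PySem.Set.mem_ofList _ _).mp hc
        simp only [Function.comp, ne_eq]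
        intro hcnt
        apply hres
        refine ⟨c, hperm.mem_iff.mpr hcx, ?_⟩
        rw [hperm.count_eq]
        have h' : (xs.count c : Int) = (n : Int) := by simpa using hcnt
        exact_mod_cast h'
  exact Prod.ext (by simpa using hany 2) (by simpa using hany 3)

-- ===== VERDICT (by name: the statement is the Claim_ definition above) =====
theorem idReducer_spec : Claim_equal_idReducer := by
  intro res val _ _
  unfold Spec_idReducer idReducer idReducer_alt
  rw [flags_eq]
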